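-- pv_equiv track=rewrite | github.com/lanl/scf | src/utility.py | rollover_block
-- ===== SOURCE A (Python) =====
-- def rollover_block(n, b, p, allow_longer=False):
--
--     start = []
--     end = []
--     ibeg = 1
--     iend = b
--     start.append(ibeg)
--     end.append(iend)
--     nb = 1
--
--     if allow_longer:
--         # if the last chunck can be longer than the max length
--         while iend < n:
--
--             ibeg = ibeg + b - p
--             iend = iend + b - p
--
--             stop = False
--             if ibeg > n:
--                 break
--
--             start.append(ibeg)
--             end.append(iend)
--             nb = nb + 1
--
--     else:
--         # otherwise, turn back at the tail
--
--         if iend >= n: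
--             end[0] = n
--         else:
--             while ibeg <= n:
--
--                 ibeg = ibeg + b - p
--                 iend = iend + b - p
--
--                 stop = False
--                 if iend >= n:
--                     iend = n
--                     ibeg = iend - b + 1
--                     stop = True
--
--                 start.append(ibeg)
--                 end.append(iend)
--                 nb = nb + 1
--
--                 if stop:
--                     break
--
--     for i in range(nb):
--         start[i] = start[i] - 1
--         end[i] = end[i] - 1
--
--     return nb, start, end
-- ===== SOURCE B (Python) =====
-- def rollover_block(n, b, p, allow_longer=False):
--     """Split positions 0..n-1 into blocks of length b overlapping by p
--     (inclusive 0-indexed bounds)."""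
--     if b >= n:
--         # a single block suffices
--         if allow_longer:
--             return 1, [0], [b - 1]
--         return 1, [0], [n - 1]
--     step = b - p
--     if allow_longer:
--         # walk forward; the block that reaches the tail may run past n - 1
--         start = []
--         s = 0
--         while s <= n - 1:
--             start.append(s)
--             if s + b - 1 >= n - 1:
--                 break
--             s += step
--         end = [s + b - 1 for s in start]
--     else:
--         # regular blocks whose end stays below n - 1, then one block clamped to the tail
--         inner = (n - b - 1) // step
--         start = [k * step for k in range(inner + 1)] + [n - b]
--         end = [k * step + b - 1 for k in range(inner + 1)] + [n - 1]
--     return len(start), start, end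
-- ===== Notes on version B (the rewrite author's own statement) =====
-- stated objective: simpler
-- what changed: Builds 0-indexed boundaries directly (no trailing subtract-1 pass, no parallel ibeg/iend bookkeeping): the turn-back case becomes a closed-form count of regular blocks from one floor division plus one explicitly clamped tail block, and the allow_longer case a single forward walk over start positions; Pre_ keeps the natural domain, excluding inputs where A never terminates (p >= b with b < n) and degenerate non-positive n or non-positive block length b in the turn-back case, on which A's tail handling is an accident of its loop.
-- outside the precondition, e.g. on rollover_block(-3, -4, -6, True): A returns (1, [0], [-5]), B returns (0, [], []); on rollover_block(-3, -4, -6, False): A returns (1, [0], [-5]), B returns (2, [0, 1], [-5, -4])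
import Mathlib
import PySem

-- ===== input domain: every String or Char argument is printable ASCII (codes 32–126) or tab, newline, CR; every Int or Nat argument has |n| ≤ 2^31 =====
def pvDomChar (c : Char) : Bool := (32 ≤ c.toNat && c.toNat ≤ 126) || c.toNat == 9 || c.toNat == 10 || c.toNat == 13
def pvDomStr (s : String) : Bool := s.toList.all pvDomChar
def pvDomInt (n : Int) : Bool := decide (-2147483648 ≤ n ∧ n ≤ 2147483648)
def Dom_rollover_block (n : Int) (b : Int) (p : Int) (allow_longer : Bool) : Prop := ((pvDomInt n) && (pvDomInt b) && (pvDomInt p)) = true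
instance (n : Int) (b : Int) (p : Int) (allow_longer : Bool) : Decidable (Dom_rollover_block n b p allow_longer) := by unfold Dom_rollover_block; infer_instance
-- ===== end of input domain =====

-- B builds the 0-indexed boundaries directly (closed-form regular-block count plus an explicit
-- clamped tail block in the turn-back case, a single forward walk in the allow_longer case);
-- equivalence is proved on Pre_ (the natural domain on which A terminates).

-- ===== PORT A =====
-- the allow_longer while-loop of A (fuel is a port artifact; it is sufficient on Pre_)
def rolloverLoopLonger (n b p : Int) : Nat → Int → Int → Int → List Int → List Int → (Int × List Int × List Int)
  | 0, _, _, nb, s, e => (nb, s, e)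
  | fuel+1, ibeg, iend, nb, s, e =>
    if iend < n then
      let ibeg' := ibeg + b - p
      let iend' := iend + b - p
      if ibeg' > n then (nb, s, e)
      else rolloverLoopLonger n b p fuel ibeg' iend' (nb + 1) (s ++ [ibeg']) (e ++ [iend'])
    else (nb, s, e)

-- the turn-back while-loop of A
def rolloverLoopElse (n b p : Int) : Nat → Int → Int → Int → List Int → List Int → (Int × List Int × List Int)
  | 0, _, _, nb, s, e => (nb, s, e)
  | fuel+1, ibeg, iend, nb, s, e =>
    if ibeg ≤ n then
      let iend' := iend + b - p
      if iend' ≥ n then (nb + 1, s ++ [n - b + 1], e ++ [n])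
      else rolloverLoopElse n b p fuel (ibeg + b - p) iend' (nb + 1) (s ++ [ibeg + b - p]) (e ++ [iend'])
    else (nb, s, e)

def rollover_block (n : Int) (b : Int) (p : Int) (allow_longer : Bool) : Int × List Int × List Int :=
  -- start = [1], end = [b], nb = 1
  let r : Int × List Int × List Int :=
    if allow_longer then
      rolloverLoopLonger n b p (n - b).toNat 1 b 1 [1] [b]
    else
      if b ≥ n then (1, [1], [n])   -- end[0] = n on the singleton list
      else rolloverLoopElse n b p n.toNat 1 b 1 [1] [b]
  -- final pass: start[i] -= 1; end[i] -= 1 for i in range(nb)  (nb = len(start) = len(end))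
  (r.1, r.2.1.map (· - 1), r.2.2.map (· - 1))

-- ===== PORT B =====
-- B's allow_longer while-loop (fuel is a port artifact; it is sufficient on Pre_)
def rbAltLoop (n b step : Int) : Nat → Int → List Int → List Int
  | 0, _, start => start
  | fuel+1, s, start =>
    if s ≤ n - 1 then
      let start' := start ++ [s]
      if s + b - 1 ≥ n - 1 then start'
      else rbAltLoop n b step fuel (s + step) start'
    else start

def rollover_block_alt (n : Int) (b : Int) (p : Int) (allow_longer : Bool) : Int × List Int × List Int :=
  if b ≥ n then
    if allow_longer then (1, [0], [b - 1]) else (1, [0], [n - 1])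
  else
    let step := b - p
    if allow_longer then
      let start := rbAltLoop n b step (n.toNat + 1) 0 []
      let e := start.map (fun s => s + b - 1)
      ((start.length : Int), start, e)
    else
      let inner := PySem.Int.floordiv (n - b - 1) step
      let start := (PySem.List.pyRange 0 (inner + 1) 1).map (fun k => k * step) ++ [n - b]
      let e := (PySem.List.pyRange 0 (inner + 1) 1).map (fun k => k * step + b - 1) ++ [n - 1]
      ((start.length : Int), start, e)

-- ===== PRECONDITION & SPEC =====
-- Pre_ keeps the natural domain: it excludes inputs where A never terminates (p ≥ b with b < n),
-- and the degenerate inputs outside the task's natural domain — non-positive length n, and a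
-- non-positive block length b in the turn-back branch — where A's tail handling (an unconditional
-- first block past the data, a tail left unclamped) is an accident of its loop.
def Pre_rollover_block (n : Int) (b : Int) (p : Int) (allow_longer : Bool) : Prop :=
  n ≤ b ∨ (p < b ∧ 1 ≤ n ∧ (allow_longer = true ∨ 1 ≤ b))
instance (n : Int) (b : Int) (p : Int) (allow_longer : Bool) : Decidable (Pre_rollover_block n b p allow_longer) := by unfold Pre_rollover_block; infer_instance
def pvWitness_rollover_block : Int × Int × Int × Bool := (10, 4, 1, false)

def Spec_rollover_block (n : Int) (b : Int) (p : Int) (allow_longer : Bool) (out : Int × List Int × List Int) : Prop := out = rollover_block_alt n b p allow_longer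
instance (n : Int) (b : Int) (p : Int) (allow_longer : Bool) (out : Int × List Int × List Int) : Decidable (Spec_rollover_block n b p allow_longer out) := by unfold Spec_rollover_block; infer_instance

-- ===== CLAIM =====
def Claim_equal_rollover_block : Prop := ∀ (n : Int) (b : Int) (p : Int) (allow_longer : Bool), Dom_rollover_block n b p allow_longer → Pre_rollover_block n b p allow_longer → Spec_rollover_block n b p allow_longer (rollover_block n b p allow_longer)

-- ===== LEMMAS AND PROOFS =====

-- shifting one appended block into the front of a range-comprehension
theorem rollover_shift (st c : Int) (M : Nat) :
    (c + st) :: (List.range M).map (fun (i : Nat) => c + st + ((i : Int) + 1) * st)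
      = (List.range (M + 1)).map (fun (i : Nat) => c + ((i : Int) + 1) * st) := by
  rw [List.range_succ_eq_map, List.map_cons, List.map_map]
  refine congrArg₂ _ (by push_cast; ring) ?_
  refine List.map_congr_left (fun i _ => ?_)
  simp only [Function.comp_apply, Nat.cast_succ]
  ring

-- the same shift, with the head block in front of the comprehension
theorem rollover_shift0 (st c : Int) (M : Nat) :
    (List.range (M + 1)).map (fun (i : Nat) => c + (i : Int) * st)
      = c :: (List.range M).map (fun (i : Nat) => c + st + (i : Int) * st) := by
  rw [List.range_succ_eq_map, List.map_cons, List.map_map]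
  refine congrArg₂ _ (by push_cast; ring) ?_
  refine List.map_congr_left (fun i _ => ?_)
  simp only [Function.comp_apply, Nat.cast_succ]
  ring

-- characterization of A's allow_longer loop: from state (ibeg, iend) it appends exactly
-- M = (min (⌊(n-1-iend)/(b-p)⌋ + 1) (⌊(n-ibeg)/(b-p)⌋)).toNat arithmetic-progression blocks
theorem rolloverLoopLonger_spec (n b p : Int) (hs : 0 < b - p) :
    ∀ (fuel : Nat) (ibeg iend nb : Int) (s e : List Int), (n - iend).toNat ≤ fuel →
    rolloverLoopLonger n b p fuel ibeg iend nb s e =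
      (nb + ((min (PySem.Int.floordiv (n - 1 - iend) (b - p) + 1) (PySem.Int.floordiv (n - ibeg) (b - p))).toNat : Int),
       s ++ (List.range (min (PySem.Int.floordiv (n - 1 - iend) (b - p) + 1) (PySem.Int.floordiv (n - ibeg) (b - p))).toNat).map (fun (i : Nat) => ibeg + ((i : Int) + 1) * (b - p)),
       e ++ (List.range (min (PySem.Int.floordiv (n - 1 - iend) (b - p) + 1) (PySem.Int.floordiv (n - ibeg) (b - p))).toNat).map (fun (i : Nat) => iend + ((i : Int) + 1) * (b - p))) := by
  intro fuel
  induction fuel with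
  | zero =>
    intro ibeg iend nb s e hf
    have h1 : PySem.Int.floordiv (n - 1 - iend) (b - p) < 0 :=
      (PySem.Int.floordiv_lt_iff_lt_mul hs).2 (by omega)
    have hm : (min (PySem.Int.floordiv (n - 1 - iend) (b - p) + 1) (PySem.Int.floordiv (n - ibeg) (b - p))).toNat = 0 := by omega
    simp [rolloverLoopLonger, hm]
  | succ fuel ih =>
    intro ibeg iend nb s e hf
    by_cases hlt : iend < n
    · by_cases hbr : ibeg + b - p > n
      · have h2 : PySem.Int.floordiv (n - ibeg) (b - p) < 1 :=
          (PySem.Int.floordiv_lt_iff_lt_mul hs).2 (by linarith)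
        have hm : (min (PySem.Int.floordiv (n - 1 - iend) (b - p) + 1) (PySem.Int.floordiv (n - ibeg) (b - p))).toNat = 0 := by omega
        simp [rolloverLoopLonger, hlt, hbr, hm]
      · have h1 : (0 : Int) ≤ PySem.Int.floordiv (n - 1 - iend) (b - p) :=
          (PySem.Int.le_floordiv_iff_mul_le hs).2 (by omega)
        have h2 : (1 : Int) ≤ PySem.Int.floordiv (n - ibeg) (b - p) :=
          (PySem.Int.le_floordiv_iff_mul_le hs).2 (by linarith)
        have hq1 : PySem.Int.floordiv (n - 1 - (iend + b - p)) (b - p) = PySem.Int.floordiv (n - 1 - iend) (b - p) - 1 := by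
          rw [PySem.Int.floordiv_eq_ediv_of_pos hs, PySem.Int.floordiv_eq_ediv_of_pos hs,
            show n - 1 - (iend + b - p) = (n - 1 - iend) + (-1) * (b - p) by ring,
            Int.add_mul_ediv_right _ _ (by omega : b - p ≠ 0)]
          omega
        have hq2 : PySem.Int.floordiv (n - (ibeg + b - p)) (b - p) = PySem.Int.floordiv (n - ibeg) (b - p) - 1 := by
          rw [PySem.Int.floordiv_eq_ediv_of_pos hs, PySem.Int.floordiv_eq_ediv_of_pos hs,
            show n - (ibeg + b - p) = (n - ibeg) + (-1) * (b - p) by ring,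
            Int.add_mul_ediv_right _ _ (by omega : b - p ≠ 0)]
          omega
        have hrec := ih (ibeg + b - p) (iend + b - p) (nb + 1) (s ++ [ibeg + b - p]) (e ++ [iend + b - p]) (by omega)
        rw [hq1, hq2] at hrec
        set q1 := PySem.Int.floordiv (n - 1 - iend) (b - p) with hq1d
        set q2 := PySem.Int.floordiv (n - ibeg) (b - p) with hq2d
        have hM : (min (q1 + 1) q2).toNat = (min (q1 - 1 + 1) (q2 - 1)).toNat + 1 := by omega
        simp only [rolloverLoopLonger]
        rw [if_pos hlt, if_neg hbr, hrec, hM,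
          show ibeg + b - p = ibeg + (b - p) by ring, show iend + b - p = iend + (b - p) by ring]
        simp only [Prod.mk.injEq]
        refine ⟨by push_cast; ring, ?_, ?_⟩ <;>
        · rw [← rollover_shift]
          simp
    · have h1 : PySem.Int.floordiv (n - 1 - iend) (b - p) < 0 :=
        (PySem.Int.floordiv_lt_iff_lt_mul hs).2 (by omega)
      have hm : (min (PySem.Int.floordiv (n - 1 - iend) (b - p) + 1) (PySem.Int.floordiv (n - ibeg) (b - p))).toNat = 0 := by omega
      simp [rolloverLoopLonger, hlt, hm]

-- characterization of A's turn-back loop: M regular blocks, then a clamped final block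
-- exactly when the loop is entered once more, i.e. when M*(b-p) ≤ n - ibeg
theorem rolloverLoopElse_spec (n b p : Int) (hs : 0 < b - p) :
    ∀ (fuel : Nat) (ibeg iend nb : Int) (s e : List Int), (n + 1 - ibeg).toNat ≤ fuel →
    rolloverLoopElse n b p fuel ibeg iend nb s e =
      (if ((min (PySem.Int.floordiv (n - ibeg) (b - p) + 1) (PySem.Int.floordiv (n - 1 - iend) (b - p))).toNat : Int) * (b - p) ≤ n - ibeg then
        (nb + ((min (PySem.Int.floordiv (n - ibeg) (b - p) + 1) (PySem.Int.floordiv (n - 1 - iend) (b - p))).toNat : Int) + 1,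
         s ++ (List.range (min (PySem.Int.floordiv (n - ibeg) (b - p) + 1) (PySem.Int.floordiv (n - 1 - iend) (b - p))).toNat).map (fun (i : Nat) => ibeg + ((i : Int) + 1) * (b - p)) ++ [n - b + 1],
         e ++ (List.range (min (PySem.Int.floordiv (n - ibeg) (b - p) + 1) (PySem.Int.floordiv (n - 1 - iend) (b - p))).toNat).map (fun (i : Nat) => iend + ((i : Int) + 1) * (b - p)) ++ [n])
      else
        (nb + ((min (PySem.Int.floordiv (n - ibeg) (b - p) + 1) (PySem.Int.floordiv (n - 1 - iend) (b - p))).toNat : Int),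
         s ++ (List.range (min (PySem.Int.floordiv (n - ibeg) (b - p) + 1) (PySem.Int.floordiv (n - 1 - iend) (b - p))).toNat).map (fun (i : Nat) => ibeg + ((i : Int) + 1) * (b - p)),
         e ++ (List.range (min (PySem.Int.floordiv (n - ibeg) (b - p) + 1) (PySem.Int.floordiv (n - 1 - iend) (b - p))).toNat).map (fun (i : Nat) => iend + ((i : Int) + 1) * (b - p)))) := by
  intro fuel
  induction fuel with
  | zero =>
    intro ibeg iend nb s e hf
    have h1 : PySem.Int.floordiv (n - ibeg) (b - p) < 0 :=
      (PySem.Int.floordiv_lt_iff_lt_mul hs).2 (by omega)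
    have hm : (min (PySem.Int.floordiv (n - ibeg) (b - p) + 1) (PySem.Int.floordiv (n - 1 - iend) (b - p))).toNat = 0 := by omega
    rw [hm, if_neg (by push_cast; omega)]
    simp [rolloverLoopElse]
  | succ fuel ih =>
    intro ibeg iend nb s e hf
    by_cases hin : ibeg ≤ n
    · by_cases hcl : iend + b - p ≥ n
      · have h2 : PySem.Int.floordiv (n - 1 - iend) (b - p) < 1 :=
          (PySem.Int.floordiv_lt_iff_lt_mul hs).2 (by linarith)
        have hm : (min (PySem.Int.floordiv (n - ibeg) (b - p) + 1) (PySem.Int.floordiv (n - 1 - iend) (b - p))).toNat = 0 := by omega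
        rw [hm, if_pos (by push_cast; omega)]
        simp only [rolloverLoopElse]
        rw [if_pos hin, if_pos hcl]
        simp
      · have h1 : (0 : Int) ≤ PySem.Int.floordiv (n - ibeg) (b - p) :=
          (PySem.Int.le_floordiv_iff_mul_le hs).2 (by omega)
        have h2 : (1 : Int) ≤ PySem.Int.floordiv (n - 1 - iend) (b - p) :=
          (PySem.Int.le_floordiv_iff_mul_le hs).2 (by linarith)
        have hq1 : PySem.Int.floordiv (n - (ibeg + b - p)) (b - p) = PySem.Int.floordiv (n - ibeg) (b - p) - 1 := by
          rw [PySem.Int.floordiv_eq_ediv_of_pos hs, PySem.Int.floordiv_eq_ediv_of_pos hs,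
            show n - (ibeg + b - p) = (n - ibeg) + (-1) * (b - p) by ring,
            Int.add_mul_ediv_right _ _ (by omega : b - p ≠ 0)]
          omega
        have hq2 : PySem.Int.floordiv (n - 1 - (iend + b - p)) (b - p) = PySem.Int.floordiv (n - 1 - iend) (b - p) - 1 := by
          rw [PySem.Int.floordiv_eq_ediv_of_pos hs, PySem.Int.floordiv_eq_ediv_of_pos hs,
            show n - 1 - (iend + b - p) = (n - 1 - iend) + (-1) * (b - p) by ring,
            Int.add_mul_ediv_right _ _ (by omega : b - p ≠ 0)]
          omega
        have hrec := ih (ibeg + b - p) (iend + b - p) (nb + 1) (s ++ [ibeg + b - p]) (e ++ [iend + b - p]) (by omega)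
        rw [hq1, hq2] at hrec
        set q1 := PySem.Int.floordiv (n - ibeg) (b - p) with hq1d
        set q2 := PySem.Int.floordiv (n - 1 - iend) (b - p) with hq2d
        have hM : (min (q1 + 1) q2).toNat = (min (q1 - 1 + 1) (q2 - 1)).toNat + 1 := by omega
        have hcond : (((min (q1 - 1 + 1) (q2 - 1)).toNat : Int) * (b - p) ≤ n - (ibeg + (b - p)))
            ↔ ((((min (q1 - 1 + 1) (q2 - 1)).toNat + 1 : Nat) : Int) * (b - p) ≤ n - ibeg) := by
          push_cast
          constructor <;> intro h <;> nlinarith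
        simp only [rolloverLoopElse]
        rw [if_neg (by omega : ¬ iend + b - p ≥ n), if_pos hin, hrec, hM,
          show ibeg + b - p = ibeg + (b - p) by ring, show iend + b - p = iend + (b - p) by ring]
        split_ifs with hA hB hB
        · simp only [Prod.mk.injEq]
          refine ⟨by push_cast; ring, ?_, ?_⟩ <;>
          · rw [← rollover_shift]
            simp
        · exact absurd (hcond.mp hA) hB
        · exact absurd (hcond.mpr hB) hA
        · simp only [Prod.mk.injEq]
          refine ⟨by push_cast; ring, ?_, ?_⟩ <;>
          · rw [← rollover_shift]
            simp
    · have h1 : PySem.Int.floordiv (n - ibeg) (b - p) < 0 :=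
        (PySem.Int.floordiv_lt_iff_lt_mul hs).2 (by omega)
      have hm : (min (PySem.Int.floordiv (n - ibeg) (b - p) + 1) (PySem.Int.floordiv (n - 1 - iend) (b - p))).toNat = 0 := by omega
      rw [hm, if_neg (by push_cast; omega)]
      simp only [rolloverLoopElse]
      rw [if_neg hin]
      simp

-- characterization of B's forward walk: from s ≤ n-1 it appends the same min-count of blocks
theorem rbAltLoop_spec (n b step : Int) (hs : 0 < step) :
    ∀ (fuel : Nat) (s : Int) (acc : List Int), s ≤ n - 1 → (n - 1 - s).toNat < fuel →
    rbAltLoop n b step fuel s acc =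
      acc ++ (List.range ((min (PySem.Int.floordiv (n - 1 - b - s) step + 1) (PySem.Int.floordiv (n - 1 - s) step)).toNat + 1)).map (fun (i : Nat) => s + (i : Int) * step) := by
  intro fuel
  induction fuel with
  | zero => intro s acc hsle hf; omega
  | succ fuel ih =>
    intro s acc hsle hf
    by_cases hend : s + b - 1 ≥ n - 1
    · have h1 : PySem.Int.floordiv (n - 1 - b - s) step < 0 :=
        (PySem.Int.floordiv_lt_iff_lt_mul hs).2 (by omega)
      have h0 : (0 : Int) ≤ PySem.Int.floordiv (n - 1 - s) step :=
        (PySem.Int.le_floordiv_iff_mul_le hs).2 (by omega)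
      have hm : (min (PySem.Int.floordiv (n - 1 - b - s) step + 1) (PySem.Int.floordiv (n - 1 - s) step)).toNat = 0 := by omega
      simp [rbAltLoop, hsle, hend, hm]
    · have h1 : (0 : Int) ≤ PySem.Int.floordiv (n - 1 - b - s) step :=
        (PySem.Int.le_floordiv_iff_mul_le hs).2 (by omega)
      by_cases hnext : s + step ≤ n - 1
      · have h2 : (1 : Int) ≤ PySem.Int.floordiv (n - 1 - s) step :=
          (PySem.Int.le_floordiv_iff_mul_le hs).2 (by omega)
        have hq1 : PySem.Int.floordiv (n - 1 - b - (s + step)) step = PySem.Int.floordiv (n - 1 - b - s) step - 1 := by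
          rw [PySem.Int.floordiv_eq_ediv_of_pos hs, PySem.Int.floordiv_eq_ediv_of_pos hs,
            show n - 1 - b - (s + step) = (n - 1 - b - s) + (-1) * step by ring,
            Int.add_mul_ediv_right _ _ (by omega : step ≠ 0)]
          omega
        have hq2 : PySem.Int.floordiv (n - 1 - (s + step)) step = PySem.Int.floordiv (n - 1 - s) step - 1 := by
          rw [PySem.Int.floordiv_eq_ediv_of_pos hs, PySem.Int.floordiv_eq_ediv_of_pos hs,
            show n - 1 - (s + step) = (n - 1 - s) + (-1) * step by ring,
            Int.add_mul_ediv_right _ _ (by omega : step ≠ 0)]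
          omega
        have hfuel : (n - 1 - (s + step)).toNat < fuel := by omega
        have hrec := ih (s + step) (acc ++ [s]) hnext hfuel
        rw [hq1, hq2] at hrec
        set q1 := PySem.Int.floordiv (n - 1 - b - s) step with hq1d
        set q2 := PySem.Int.floordiv (n - 1 - s) step with hq2d
        have hM : (min (q1 + 1) q2).toNat + 1 = ((min (q1 - 1 + 1) (q2 - 1)).toNat + 1) + 1 := by omega
        simp only [rbAltLoop]
        rw [if_pos hsle, if_neg hend, hrec, hM, List.append_assoc, List.singleton_append,
          rollover_shift0 step s ((min (q1 - 1 + 1) (q2 - 1)).toNat + 1)]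
      · -- next start is out of range: the recursive call returns its accumulator untouched
        have h0 : (0 : Int) ≤ PySem.Int.floordiv (n - 1 - s) step :=
          (PySem.Int.le_floordiv_iff_mul_le hs).2 (by omega)
        have h2 : PySem.Int.floordiv (n - 1 - s) step < 1 :=
          (PySem.Int.floordiv_lt_iff_lt_mul hs).2 (by omega)
        have hm : (min (PySem.Int.floordiv (n - 1 - b - s) step + 1) (PySem.Int.floordiv (n - 1 - s) step)).toNat = 0 := by omega
        have hstop : rbAltLoop n b step fuel (s + step) (acc ++ [s]) = acc ++ [s] := by
          cases fuel with
          | zero => rfl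
          | succ fuel => simp [rbAltLoop, hnext]
        simp [rbAltLoop, hsle, hend, hstop, hm]

-- bridge: a comprehension over range(M+1) is the head block followed by A's M appended blocks
theorem rollover_bridge (st c : Int) (M : Nat) :
    (PySem.List.pyRange 0 ((M : Int) + 1) 1).map (fun i => i * st + c)
      = c :: (List.range M).map (fun (i : Nat) => ((i : Int) + 1) * st + c) := by
  rw [show ((M : Int) + 1) = ((M + 1 : Nat) : Int) by push_cast; ring,
    PySem.List.pyRange_zero_natCast, List.map_map, List.range_succ_eq_map, List.map_cons, List.map_map]
  refine congrArg₂ _ (by simp) ?_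
  refine List.map_congr_left (fun i _ => ?_)
  simp only [Function.comp_apply, Nat.cast_succ]

-- ===== VERDICT =====
theorem rollover_block_spec : Claim_equal_rollover_block := by
  intro n b p al _ hpre
  unfold Spec_rollover_block rollover_block rollover_block_alt
  by_cases hbn : b ≥ n
  · have hf : (n - b).toNat = 0 := by omega
    cases al <;> simp [hf, rolloverLoopLonger, hbn]
  · have hpre' : p < b ∧ 1 ≤ n ∧ (al = true ∨ 1 ≤ b) := by
      rcases hpre with h | h
      · omega
      · exact h
    have hs : 0 < b - p := by omega
    obtain ⟨-, hn1, hbal⟩ := hpre'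
    cases al
    · -- else (turn-back) branch
      have hb1 : 1 ≤ b := by simpa using hbal
      rw [rolloverLoopElse_spec n b p hs n.toNat 1 b 1 [1] [b] (by omega)]
      simp only [if_neg hbn, Bool.false_eq_true, ite_false]
      have hq2nn : (0 : Int) ≤ PySem.Int.floordiv (n - 1 - b) (b - p) :=
        (PySem.Int.le_floordiv_iff_mul_le hs).2 (by omega)
      have hqle : PySem.Int.floordiv (n - 1 - b) (b - p) ≤ PySem.Int.floordiv (n - 1) (b - p) := by
        rw [PySem.Int.floordiv_eq_ediv_of_pos hs, PySem.Int.floordiv_eq_ediv_of_pos hs]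
        exact Int.ediv_le_ediv hs (by omega)
      obtain ⟨N, hN⟩ : ∃ N : Nat, PySem.Int.floordiv (n - 1 - b) (b - p) = (N : Int) :=
        ⟨_, (Int.toNat_of_nonneg hq2nn).symm⟩
      have hmin : min (PySem.Int.floordiv (n - 1) (b - p) + 1) (PySem.Int.floordiv (n - 1 - b) (b - p)) = (N : Int) := by omega
      have hmul : (N : Int) * (b - p) ≤ n - 1 - b :=
        (PySem.Int.le_floordiv_iff_mul_le hs).1 hN.ge
      have hinner : PySem.Int.floordiv (n - b - 1) (b - p) = (N : Int) := by
        rw [show n - b - 1 = n - 1 - b from by ring]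
        exact hN
      rw [hmin, hinner]
      simp only [Int.toNat_natCast]
      rw [if_pos (by omega : ((N : Int)) * (b - p) ≤ n - 1)]
      rw [show (fun k => k * (b - p)) = (fun k => k * (b - p) + 0) from funext (fun k => by ring),
        show (fun k => k * (b - p) + b - 1) = (fun k => k * (b - p) + (b - 1)) from funext (fun k => by ring),
        rollover_bridge (b - p) 0 N, rollover_bridge (b - p) (b - 1) N]
      simp only [Prod.mk.injEq]
      refine ⟨?_, ?_, ?_⟩
      · simp only [List.length_append, List.length_cons, List.length_map, List.length_range,
          List.length_nil]
        push_cast; ring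
      · simp only [List.map_append, List.map_cons, List.map_map, List.map_nil, List.cons_append,
          List.nil_append]
        refine congrArg₂ _ (by ring) (congrArg₂ _ ?_ (by norm_num))
        refine List.map_congr_left (fun i _ => ?_)
        simp only [Function.comp_apply]
        ring
      · simp only [List.map_append, List.map_cons, List.map_map, List.map_nil, List.cons_append,
          List.nil_append]
        refine congrArg₂ _ (by ring) (congrArg₂ _ ?_ (by norm_num))
        refine List.map_congr_left (fun i _ => ?_)
        simp only [Function.comp_apply]
        ring
    · -- allow_longer branch
      rw [rolloverLoopLonger_spec n b p hs (n - b).toNat 1 b 1 [1] [b] (by omega)]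
      simp only [if_neg hbn, ite_true]
      rw [rbAltLoop_spec n b (b - p) hs (n.toNat + 1) 0 [] (by omega) (by omega)]
      rw [show n - 1 - b - 0 = n - 1 - b from by ring, show n - 1 - (0 : Int) = n - 1 from by ring]
      set M := (min (PySem.Int.floordiv (n - 1 - b) (b - p) + 1) (PySem.Int.floordiv (n - 1) (b - p))).toNat with hMd
      simp only [List.nil_append, Prod.mk.injEq]
      have hlist : (List.range (M + 1)).map (fun (i : Nat) => (0 : Int) + (i : Int) * (b - p))
          = (0 : Int) :: (List.range M).map (fun (i : Nat) => (1 : Int) + ((i : Int) + 1) * (b - p) - 1) := by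
        rw [List.range_succ_eq_map, List.map_cons, List.map_map]
        refine congrArg₂ _ (by norm_num) ?_
        refine List.map_congr_left (fun i _ => ?_)
        simp only [Function.comp_apply, Nat.cast_succ]
        ring
      refine ⟨?_, ?_, ?_⟩
      · simp only [List.length_map, List.length_range]
        push_cast; ring
      · rw [hlist]
        simp only [List.map_cons, List.map_map, List.cons_append, List.nil_append]
        norm_num
      · rw [hlist]
        simp only [List.map_cons, List.map_map, List.cons_append, List.nil_append]
        refine congrArg₂ _ (by ring) ?_
        refine List.map_congr_left (fun i _ => ?_)
        simp only [Function.comp_apply]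
        ring
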